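-- pv_equiv track=rewrite | github.com/Valorando/Homework_LXIV | Tasks.py | Return_count_deleted
-- ===== SOURCE A (Python) =====
-- def Return_count_deleted(arr, deleted_digits):
--     count = 0
--     for num in arr:
--         num_str = str(num)
--         if all(str(digit) not in num_str for digit in deleted_digits):
--             continue
--         else:
--             count += 1
--     return count
-- ===== SOURCE B (Python) =====
-- def Return_count_deleted(arr, deleted_digits):
--     strs = [str(n) for n in arr]
--     matched = [False] * len(strs)
--     for p in dict.fromkeys(str(d) for d in deleted_digits):
--         for i, s in enumerate(strs):
--             if not matched[i] and p in s:
--                 matched[i] = True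
--     return sum(matched)
-- ===== Notes on version B (the rewrite author's own statement) =====
-- stated objective: alternative
-- what changed: B inverts the loop nesting: it stringifies arr once, deduplicates the pattern strings, then pattern-by-pattern marks matching entries in a boolean array (skipping already-marked ones) and returns the number of marks, instead of A's per-number inner scan over deleted_digits.
import Mathlib
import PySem

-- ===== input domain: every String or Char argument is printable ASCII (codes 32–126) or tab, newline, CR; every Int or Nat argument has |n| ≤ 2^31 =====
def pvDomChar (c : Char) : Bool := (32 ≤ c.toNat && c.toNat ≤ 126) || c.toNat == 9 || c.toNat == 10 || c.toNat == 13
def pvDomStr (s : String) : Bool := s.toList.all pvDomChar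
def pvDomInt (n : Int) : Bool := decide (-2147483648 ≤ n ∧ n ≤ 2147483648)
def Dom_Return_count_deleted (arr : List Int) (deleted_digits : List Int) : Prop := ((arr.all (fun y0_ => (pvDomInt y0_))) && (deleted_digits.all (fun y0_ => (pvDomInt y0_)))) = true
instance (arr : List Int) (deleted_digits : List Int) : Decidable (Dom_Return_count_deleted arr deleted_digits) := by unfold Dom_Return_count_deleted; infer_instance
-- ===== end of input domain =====

-- B inverts the loop nesting: patterns outer (deduplicated), numbers inner, marking matches
-- in a boolean array and returning the number of marks (alternative; return value unchanged).

-- ===== PORT A =====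
def Return_count_deleted (arr : List Int) (deleted_digits : List Int) : Int :=
  arr.foldl (fun count num =>
    let numStr := PySem.Int.toStr num
    if deleted_digits.all (fun digit => !(PySem.Str.isIn (PySem.Int.toStr digit) numStr)) then
      count
    else
      count + 1) 0

-- ===== PORT B =====
-- inner loop 'for i, s in enumerate(strs): if not matched[i] and p in s: matched[i] = True'
-- written as one pointwise pass over strs zipped with matched
def pvMarkPass (p : String) (strs : List String) (m : List Bool) : List Bool :=
  (strs.zip m).map (fun sb => if !sb.2 && PySem.Str.isIn p sb.1 then true else sb.2)

def Return_count_deleted_alt (arr : List Int) (deleted_digits : List Int) : Int :=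
  let strs := arr.map PySem.Int.toStr
  let init : List Bool := strs.map (fun _ => false)
  let pats := PySem.List.dedup (deleted_digits.map PySem.Int.toStr)  -- dict.fromkeys dedup
  let final := pats.foldl (fun m p => pvMarkPass p strs m) init
  ((final.filter (fun b => b)).length : Int)

-- ===== PRECONDITION & SPEC =====
def Spec_Return_count_deleted (arr : List Int) (deleted_digits : List Int) (out : Int) : Prop := out = Return_count_deleted_alt arr deleted_digits
instance (arr : List Int) (deleted_digits : List Int) (out : Int) : Decidable (Spec_Return_count_deleted arr deleted_digits out) := by unfold Spec_Return_count_deleted; infer_instance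

-- ===== CLAIM (what is proved, stated in full; the proofs are below) =====
def Claim_equal_Return_count_deleted : Prop := ∀ (arr : List Int) (deleted_digits : List Int), Dom_Return_count_deleted arr deleted_digits → Spec_Return_count_deleted arr deleted_digits (Return_count_deleted arr deleted_digits)

-- ===== LEMMAS AND PROOFS =====

-- A's loop condition is the negation of 'some pattern occurs'.
theorem all_not_eq_not_any {α : Type} (l : List α) (p : α → Bool) :
    (l.all fun x => !(p x)) = !(l.any p) := by
  induction l with
  | nil => rfl
  | cons x t ih => simp [List.all_cons, List.any_cons, ih]

-- A's fold from any accumulator equals accumulator + number of matching elements.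
theorem foldl_count_eq {α : Type} (l : List α) (p : α → Bool) (c : Int) :
    l.foldl (fun count x => if !(p x) then count else count + 1) c
      = c + ((l.filter p).length : Int) := by
  induction l generalizing c with
  | nil => simp
  | cons x t ih =>
    simp only [List.foldl_cons, List.filter_cons]
    cases h : p x
    · simpa [h] using ih c
    · simp only [Bool.not_true, Bool.false_eq_true, if_false, ih (c + 1), if_true,
        List.length_cons]
      push_cast; ring

-- one marking pass on a pointwise state strs.map f updates f pointwise by '|| isIn p'
theorem markPass_map {strs : List String} {f : String → Bool} {p : String} :
    pvMarkPass p strs (strs.map f)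
      = strs.map (fun s => f s || PySem.Str.isIn p s) := by
  induction strs with
  | nil => rfl
  | cons s t ih =>
    simp only [pvMarkPass, List.map_cons, List.zip_cons_cons] at *
    rw [ih]
    congr 1
    cases h : f s <;> cases h2 : PySem.Str.isIn p s <;> simp

-- folding the marking passes over all patterns marks exactly the strings some pattern occurs in
theorem mark_fold (pats : List String) (strs : List String) (f : String → Bool) :
    pats.foldl (fun m p => pvMarkPass p strs m) (strs.map f)
      = strs.map (fun s => f s || pats.any (fun p => PySem.Str.isIn p s)) := by
  induction pats generalizing f with
  | nil => simp
  | cons p t ih =>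
    simp only [List.foldl_cons, markPass_map, ih, List.any_cons]
    congr 1; funext s
    cases f s <;> cases PySem.Str.isIn p s <;> simp

-- counting true marks on a pointwise state = counting the strings satisfying the predicate
theorem filter_map_length {α : Type} (l : List α) (f : α → Bool) :
    ((l.map f).filter (fun b => b)).length = (l.filter f).length := by
  induction l with
  | nil => rfl
  | cons x t ih => cases h : f x <;> simp [h, ih]

-- 'any' is invariant under dedup (it only depends on membership)
theorem any_dedup {α : Type} [BEq α] [LawfulBEq α] (l : List α) (p : α → Bool) :
    (PySem.List.dedup l).any p = l.any p := by
  rw [Bool.eq_iff_iff]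
  simp only [List.any_eq_true]
  constructor
  · rintro ⟨x, hx, hp⟩; exact ⟨x, (PySem.List.mem_dedup _ _).1 hx, hp⟩
  · rintro ⟨x, hx, hp⟩; exact ⟨x, (PySem.List.mem_dedup _ _).2 hx, hp⟩

-- ===== VERDICT (by name: the statement is the Claim_ definition above) =====
theorem Return_count_deleted_spec : Claim_equal_Return_count_deleted := by
  intro arr dd _
  unfold Spec_Return_count_deleted Return_count_deleted Return_count_deleted_alt
  simp only [mark_fold, filter_map_length]
  have hfold := foldl_count_eq arr
    (fun num => dd.any (fun digit => PySem.Str.isIn (PySem.Int.toStr digit) (PySem.Int.toStr num))) 0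
  simp only [all_not_eq_not_any] at *
  rw [hfold]
  simp only [zero_add, Int.natCast_inj, List.filter_map, List.length_map]
  congr 1
  apply List.filter_congr
  intro num _
  simp only [Function.comp_apply, Bool.false_or, any_dedup, List.any_map]
  rfl
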